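-- pv_equiv track=rewrite | github.com/bobbychansfu/cmpt120-2024-3 | 5/lucky.py | count_7s_and_lucky
-- ===== SOURCE A (Python) =====
-- def count_7s_and_lucky(start,end):
--     count_7 = 0
--     div_by_7 = 0
--
--     for i in range(start,end+1):
--         count_7 += str(i).count('7')
--         if i % 7 == 0:
--             div_by_7 += 1
--     return count_7,div_by_7
-- ===== SOURCE B (Python) =====
-- def _d7(n):
--     # number of '7' digits in the decimal representation of n (n >= 0)
--     return 0 if n <= 0 else (1 if n % 10 == 7 else 0) + _d7(n // 10)
--
--
-- def _upto(n):
--     # total number of '7' digits over 0, 1, ..., n (0 if n <= 0), in O(log n)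
--     if n <= 0:
--         return 0
--     q, r = divmod(n, 10)
--     return q + (1 if r >= 7 else 0) + 10 * _upto(q - 1) + (r + 1) * _d7(q)
--
--
-- def count_7s_and_lucky(start, end):
--     if start > end:
--         return 0, 0
--     if end < 0:
--         sevens = _upto(-start) - _upto(-end - 1)
--     elif start >= 0:
--         sevens = _upto(end) - _upto(start - 1)
--     else:
--         sevens = _upto(-start) + _upto(end)
--     return sevens, end // 7 - (start - 1) // 7
-- ===== Notes on version B (the rewrite author's own statement) =====
-- stated objective: faster
-- what changed: B replaces A's per-element loop (stringifying every i to count '7's and testing i % 7) with a closed-form digit-counting recursion _upto (O(log n) cumulative count of '7' digits over 0..n, combined by sign cases) and a floor-division difference end//7 - (start-1)//7 for the multiples of 7.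
import Mathlib
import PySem

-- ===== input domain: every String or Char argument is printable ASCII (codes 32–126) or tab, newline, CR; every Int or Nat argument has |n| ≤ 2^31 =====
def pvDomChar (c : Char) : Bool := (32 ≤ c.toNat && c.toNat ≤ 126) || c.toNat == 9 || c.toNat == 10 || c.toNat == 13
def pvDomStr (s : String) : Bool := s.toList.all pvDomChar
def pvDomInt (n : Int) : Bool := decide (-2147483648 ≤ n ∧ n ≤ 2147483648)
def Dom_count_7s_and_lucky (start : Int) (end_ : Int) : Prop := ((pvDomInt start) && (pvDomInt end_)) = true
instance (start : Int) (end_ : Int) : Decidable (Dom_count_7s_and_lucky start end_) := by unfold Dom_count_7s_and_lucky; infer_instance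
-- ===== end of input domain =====

-- B replaces A's per-element scan with an O(log n) digit-counting formula for '7's and a
-- floor-division difference for the multiples of 7 (objective: faster, asymptotic).
-- Python A returns a tuple (count_7, div_by_7); per the type convention both ports return it as [count_7, div_by_7].

-- ===== PORT A =====
def count_7s_and_lucky (start : Int) (end_ : Int) : List Int :=
  -- count_7 = 0; div_by_7 = 0; for i in range(start, end+1): …
  let r := (PySem.List.pyRange start (end_ + 1)).foldl
    (fun (st : Int × Int) i =>
      (st.1 + (PySem.Str.count (PySem.Int.toStr i) "7" : Int),
       if PySem.Int.mod i 7 == 0 then st.2 + 1 else st.2))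
    (0, 0)
  [r.1, r.2]

-- ===== PORT B =====
-- _d7(n): number of '7' digits of n (n ≥ 0)
def pvD7 (n : Int) : Int :=
  if n ≤ 0 then 0
  else (if PySem.Int.mod n 10 == 7 then 1 else 0) + pvD7 (PySem.Int.floordiv n 10)
  termination_by n.toNat
  decreasing_by
    rw [PySem.Int.floordiv_eq_ediv_of_pos (by omega)]
    omega

-- _upto(n): total number of '7' digits over 0..n (0 if n ≤ 0)
def pvUpto (n : Int) : Int :=
  if n ≤ 0 then 0
  else
    let q := PySem.Int.floordiv n 10
    let r := PySem.Int.mod n 10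
    q + (if 7 ≤ r then 1 else 0) + 10 * pvUpto (q - 1) + (r + 1) * pvD7 q
  termination_by n.toNat
  decreasing_by
    rw [PySem.Int.floordiv_eq_ediv_of_pos (by omega)]
    omega

def count_7s_and_lucky_alt (start : Int) (end_ : Int) : List Int :=
  if start > end_ then [0, 0]
  else
    let sevens :=
      if end_ < 0 then pvUpto (-start) - pvUpto (-end_ - 1)
      else if start ≥ 0 then pvUpto end_ - pvUpto (start - 1)
      else pvUpto (-start) + pvUpto end_
    [sevens, PySem.Int.floordiv end_ 7 - PySem.Int.floordiv (start - 1) 7]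

-- ===== PRECONDITION & SPEC =====
def Spec_count_7s_and_lucky (start : Int) (end_ : Int) (out : List Int) : Prop := out = count_7s_and_lucky_alt start end_
instance (start : Int) (end_ : Int) (out : List Int) : Decidable (Spec_count_7s_and_lucky start end_ out) := by unfold Spec_count_7s_and_lucky; infer_instance

-- ===== CLAIM (what is proved, stated in full; the proofs are below) =====
def Claim_equal_count_7s_and_lucky : Prop := ∀ (start : Int) (end_ : Int), Dom_count_7s_and_lucky start end_ → Spec_count_7s_and_lucky start end_ (count_7s_and_lucky start end_)

-- ===== LEMMAS AND PROOFS =====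

-- Nat-level digit-7 count, the common specification both sides are reduced to.
def pvD7N (n : Nat) : Nat :=
  if n = 0 then 0 else (if n % 10 = 7 then 1 else 0) + pvD7N (n / 10)
  decreasing_by omega
lemma pv_digitChar7 (r : Nat) (h : r < 10) : (Nat.digitChar r == '7') = decide (r = 7) := by
  interval_cases r <;> decide
lemma pv_core7 : ∀ (fuel n : Nat) (ds : List Char), n ≤ fuel →
    (Nat.toDigitsCore 10 fuel n ds).count '7' = pvD7N n + ds.count '7' := by
  intro fuel
  induction fuel with
  | zero =>
    intro n ds h
    interval_cases n
    rw [pvD7N]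
    simp [Nat.toDigitsCore]
  | succ f ih =>
    intro n ds h
    rw [Nat.toDigitsCore]
    by_cases h10 : n / 10 = 0
    · have hd : pvD7N n = if n % 10 = 7 then 1 else 0 := by
        rw [pvD7N]
        by_cases h0 : n = 0
        · simp [h0]
        · rw [if_neg h0, h10, pvD7N]; simp
      rw [if_pos h10, hd, List.count_cons, pv_digitChar7 (n % 10) (by omega)]
      by_cases h7 : n % 10 = 7 <;> simp [h7] <;> omega
    · rw [if_neg h10, ih (n / 10) _ (by omega), List.count_cons,
        pv_digitChar7 (n % 10) (by omega),
        show pvD7N n = (if n % 10 = 7 then 1 else 0) + pvD7N (n / 10) from by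
          rw [pvD7N, if_neg (by omega)]]
      by_cases h7 : n % 10 = 7 <;> simp [h7] <;> omega

lemma pv_toDigits7 (n : Nat) : (Nat.toDigits 10 n).count '7' = pvD7N n := by
  have := pv_core7 (n + 1) n [] (by omega)
  simpa [Nat.toDigits] using this

lemma pv_go7 : ∀ (fuel : Nat) (s : List Char) (acc : Nat), s.length ≤ fuel →
    PySem.Chars.count.go ['7'] fuel s acc = acc + s.count '7' := by
  intro fuel
  induction fuel with
  | zero =>
    intro s acc h
    rw [PySem.Chars.count.go]
    cases s with
    | nil => simp
    | cons a t => simp at h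
  | succ f ih =>
    intro s acc h
    cases s with
    | nil => rw [PySem.Chars.count.go] <;> simp
    | cons a t =>
      rw [PySem.Chars.count.go]
      by_cases h7 : a = '7'
      · subst h7
        simp only [List.isPrefixOf, BEq.rfl, Bool.and_self, if_pos, List.length_cons,
          List.length_nil, List.drop_succ_cons, List.drop_zero]
        rw [ih t (acc + 1) (by simpa using h)]
        simp [List.count_cons]
        omega
      · rw [if_neg (by simp [List.isPrefixOf, h7]; intro hc; exact h7 hc.symm)]
        rw [ih t acc (by simpa using h)]
        simp [List.count_cons]
        intro hc; exact h7 hc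

lemma pv_chars_count7 (s : List Char) : PySem.Chars.count s ['7'] = s.count '7' := by
  rw [PySem.Chars.count]
  simpa using pv_go7 s.length s 0 le_rfl

lemma pv_countA (i : Int) : (PySem.Str.count (PySem.Int.toStr i) "7" : Int) = (pvD7N i.natAbs : Int) := by
  rw [PySem.Str.count_eq, PySem.Int.toList_toStr]
  have h7 : ("7" : String).toList = ['7'] := by decide
  rw [h7, PySem.Int.toChars]
  by_cases hneg : i < 0
  · rw [if_pos hneg, pv_chars_count7, List.count_cons]
    simp [pv_toDigits7]
  · rw [if_neg hneg, pv_chars_count7, pv_toDigits7]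
    congr 2
    omega

lemma pv_upto_nonpos (n : Int) (h : n ≤ 0) : pvUpto n = 0 := by
  rw [pvUpto]; simp [h]

lemma pv_d7_nonpos (n : Int) (h : n ≤ 0) : pvD7 n = 0 := by
  rw [pvD7]; simp [h]

lemma pv_d7_pos (n : Int) (h : 1 ≤ n) :
    pvD7 n = (if n % 10 = 7 then 1 else 0) + pvD7 (n / 10) := by
  rw [pvD7, if_neg (by omega), PySem.Int.floordiv_eq_ediv_of_pos (by omega),
    PySem.Int.mod_eq_emod_of_pos (by omega)]
  by_cases h7 : n % 10 = 7 <;> simp [h7]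

lemma pv_upto_pos (n : Int) (h : 1 ≤ n) :
    pvUpto n = n / 10 + (if 7 ≤ n % 10 then 1 else 0) + 10 * pvUpto (n / 10 - 1)
      + (n % 10 + 1) * pvD7 (n / 10) := by
  rw [pvUpto, if_neg (by omega)]
  simp only [PySem.Int.floordiv_eq_ediv_of_pos (show (0:Int) < 10 by omega),
    PySem.Int.mod_eq_emod_of_pos (show (0:Int) < 10 by omega)]

lemma pv_d7_eq (k : Nat) : pvD7 (k : Int) = (pvD7N k : Int) := by
  induction k using Nat.strong_induction_on with
  | _ k ih =>
    by_cases h0 : k = 0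
    · rw [pvD7N, pv_d7_nonpos _ (by omega)]; simp [h0]
    · rw [pv_d7_pos _ (by omega), pvD7N, if_neg h0]
      have hq : (k : Int) / 10 = ((k / 10 : Nat) : Int) := by omega
      have hr : (k : Int) % 10 = ((k % 10 : Nat) : Int) := by omega
      rw [hq, hr, ih (k / 10) (by omega)]
      by_cases h7 : k % 10 = 7
      · rw [if_pos (by omega), if_pos h7]; push_cast; ring
      · rw [if_neg (by omega), if_neg h7]; push_cast; ring

lemma pv_upto_succ : ∀ (m : Nat) (n : Int), n.toNat ≤ m → 1 ≤ n →
    pvUpto n = pvUpto (n - 1) + pvD7 n := by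
  intro m
  induction m using Nat.strong_induction_on with
  | _ m ih =>
    intro n hm h1
    by_cases hn1 : n = 1
    · subst hn1
      have a1 : pvUpto 1 = 0 := by
        rw [pv_upto_pos 1 (by omega)]
        norm_num
        rw [pv_upto_nonpos _ (by omega), pv_d7_nonpos _ (by omega)]
        ring
      have a2 : pvD7 1 = 0 := by
        rw [pv_d7_pos 1 (by omega)]
        norm_num
        exact pv_d7_nonpos 0 (by omega)
      rw [a1, show (1:Int) - 1 = 0 from rfl, pv_upto_nonpos 0 (by omega), a2]
      norm_num
    · have hn2 : 2 ≤ n := by omega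
      by_cases hr : 1 ≤ n % 10
      · -- last digit nonzero: (n-1)/10 = n/10, (n-1)%10 = n%10 - 1
        rw [pv_upto_pos n h1, pv_upto_pos (n - 1) (by omega), pv_d7_pos n h1]
        have e1 : (n - 1) / 10 = n / 10 := by omega
        have e2 : (n - 1) % 10 = n % 10 - 1 := by omega
        rw [e1, e2]
        have h10 : n % 10 < 10 := Int.emod_lt_of_pos n (by omega)
        by_cases h7 : n % 10 = 7
        · rw [if_pos (by omega), if_neg (by omega), if_pos h7]; ring
        · by_cases h8 : 7 ≤ n % 10
          · rw [if_pos h8, if_pos (by omega), if_neg h7]; ring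
          · rw [if_neg h8, if_neg (by omega), if_neg h7]; ring
      · -- last digit zero: n = 10q with q ≥ 1
        have hr0 : n % 10 = 0 := by omega
        have hq1 : 1 ≤ n / 10 := by omega
        have hn10 : 10 ≤ n := by omega
        rw [pv_upto_pos n h1, pv_upto_pos (n - 1) (by omega), pv_d7_pos n h1]
        have e1 : (n - 1) / 10 = n / 10 - 1 := by omega
        have e2 : (n - 1) % 10 = 9 := by omega
        rw [e1, e2, hr0]
        have key : pvUpto (n / 10 - 1) = pvUpto (n / 10 - 1 - 1) + pvD7 (n / 10 - 1) := by
          by_cases hq2 : 2 ≤ n / 10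
          · exact ih (n / 10 - 1).toNat (by omega) (n / 10 - 1) le_rfl (by omega)
          · have : n / 10 = 1 := by omega
            rw [this]
            norm_num
            rw [pv_upto_nonpos 0 (by omega), pv_upto_nonpos _ (by omega),
              pv_d7_nonpos 0 (by omega)]
            norm_num
        rw [key]
        norm_num
        ring

def pvCum (n : Int) : Int := if 0 ≤ n then pvUpto n else -(pvUpto (-n - 1))

lemma pv_cum_step (e : Int) : pvCum e = pvCum (e - 1) + (pvD7N e.natAbs : Int) := by
  rcases lt_trichotomy e 0 with h | h | h
  · -- e ≤ -1
    rw [pvCum, pvCum, if_neg (by omega), if_neg (by omega)]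
    have : -(e - 1) - 1 = -e := by ring
    rw [this]
    have hs := pv_upto_succ (-e).toNat (-e) le_rfl (by omega)
    have hd : pvD7 (-e) = (pvD7N e.natAbs : Int) := by
      have : -e = ((e.natAbs : Nat) : Int) := by omega
      rw [this, pv_d7_eq]
    rw [← hd]
    omega
  · subst h
    rw [pvCum, pvCum, if_pos le_rfl, if_neg (by omega), pv_upto_nonpos 0 le_rfl]
    norm_num
    rw [pv_upto_nonpos _ (by omega), pvD7N]
    norm_num
  · rw [pvCum, pvCum, if_pos (by omega), if_pos (by omega),
      pv_upto_succ e.toNat e le_rfl (by omega)]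
    have hd : pvD7 e = (pvD7N e.natAbs : Int) := by
      conv_lhs => rw [show e = ((e.natAbs : Nat) : Int) from by omega]
      rw [pv_d7_eq]
    rw [hd]

lemma pv_sum7 : ∀ (len : Nat) (s e : Int), (e + 1 - s).toNat = len → s ≤ e + 1 →
    ((PySem.List.pyRange s (e + 1)).map
      (fun i => (PySem.Str.count (PySem.Int.toStr i) "7" : Int))).sum = pvCum e - pvCum (s - 1) := by
  intro len
  induction len with
  | zero =>
    intro s e hlen hse
    have : e + 1 = s := by omega
    rw [this]
    rw [show PySem.List.pyRange s s = [] from by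
      rw [PySem.List.pyRange_one]; simp]
    have : e = s - 1 := by omega
    rw [this]
    simp
  | succ len ih =>
    intro s e hlen hse
    have hse' : s ≤ e := by omega
    have hstep := ih s (e - 1) (by omega) (by omega)
    rw [show e - 1 + 1 = e from by ring] at hstep
    rw [PySem.List.pyRange_one_succ_right hse', List.map_append, List.sum_append, hstep]
    simp only [List.map_cons, List.map_nil, List.sum_cons, List.sum_nil]
    rw [pv_countA e, pv_cum_step e]
    ring

lemma pv_div7 : ∀ (len : Nat) (s e : Int), (e + 1 - s).toNat = len → s ≤ e + 1 →
    ((PySem.List.pyRange s (e + 1)).countP (fun i => PySem.Int.mod i 7 == 0) : Int) =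
      PySem.Int.floordiv e 7 - PySem.Int.floordiv (s - 1) 7 := by
  intro len
  induction len with
  | zero =>
    intro s e hlen hse
    have h1 : e + 1 = s := by omega
    rw [h1]
    rw [show PySem.List.pyRange s s = [] from by
      rw [PySem.List.pyRange_one]; simp]
    have : e = s - 1 := by omega
    rw [this]
    simp
  | succ len ih =>
    intro s e hlen hse
    have hse' : s ≤ e := by omega
    have hind := ih s (e - 1) (by omega) (by omega)
    rw [show e - 1 + 1 = e from by ring] at hind
    rw [PySem.List.pyRange_one_succ_right hse', List.countP_append, Nat.cast_add, hind]
    have hstep : (List.countP (fun i => PySem.Int.mod i 7 == 0) [e] : Int) =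
        PySem.Int.floordiv e 7 - PySem.Int.floordiv (e - 1) 7 := by
      rw [PySem.Int.floordiv_eq_ediv_of_pos (show (0:Int) < 7 by omega),
        PySem.Int.floordiv_eq_ediv_of_pos (show (0:Int) < 7 by omega)]
      simp only [List.countP_cons, List.countP_nil]
      by_cases h7 : PySem.Int.mod e 7 = 0
      · have hd : e % 7 = 0 := by
          rwa [PySem.Int.mod_eq_emod_of_pos (by omega)] at h7
        simp only [h7]
        norm_num
        omega
      · have hd : ¬ e % 7 = 0 := by
          rwa [PySem.Int.mod_eq_emod_of_pos (by omega)] at h7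
        simp only [beq_iff_eq, h7]
        norm_num
        omega
    rw [hstep]
    ring

-- ===== VERDICT (by name: the statement is the Claim_ definition above) =====
theorem count_7s_and_lucky_spec : Claim_equal_count_7s_and_lucky := by
  unfold Claim_equal_count_7s_and_lucky Spec_count_7s_and_lucky
  intro s e _
  simp only [count_7s_and_lucky, count_7s_and_lucky_alt]
  rw [PySem.List.foldl_prod_mk
    (fun a i => a + (PySem.Str.count (PySem.Int.toStr i) "7" : Int))
    (fun b i => if PySem.Int.mod i 7 == 0 then b + 1 else b)]
  by_cases hgt : s > e
  · rw [if_pos hgt, show PySem.List.pyRange s (e + 1) = [] from by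
      rw [PySem.List.pyRange_one]
      simp
      omega]
    simp
  · rw [if_neg hgt]
    have hse : s ≤ e + 1 := by omega
    rw [PySem.List.foldl_add, PySem.List.foldl_if_add_one (fun i => PySem.Int.mod i 7 == 0)]
    rw [pv_sum7 _ s e rfl hse, pv_div7 _ s e rfl hse]
    simp only [zero_add]
    congr 1
    by_cases he : e < 0
    · rw [if_pos he, pvCum, pvCum, if_neg (by omega), if_neg (by omega),
        show -(s - 1) - 1 = -s from by ring]
      ring
    · rw [if_neg he]
      by_cases hs : s ≥ 0
      · rw [if_pos hs, pvCum, pvCum, if_pos (by omega)]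
        by_cases hs1 : 0 ≤ s - 1
        · rw [if_pos hs1]
        · rw [if_neg hs1, show -(s - 1) - 1 = -s from by ring,
            pv_upto_nonpos (-s) (by omega), pv_upto_nonpos (s - 1) (by omega)]
          ring
      · rw [if_neg hs, pvCum, pvCum, if_pos (by omega), if_neg (by omega),
          show -(s - 1) - 1 = -s from by ring]
        ring
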